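-- pv_equiv track=rewrite | github.com/karas111/advent_of_code | year2017/day6/a.py | cycle_once
-- ===== SOURCE A (Python) =====
-- from typing import Tuple
--
-- def cycle_once(blocks: Tuple[int]) -> Tuple[int]:
--     idx_start = blocks.index(max(blocks))
--     to_split = blocks[idx_start]
--     n_blocks = list(blocks)
--     n_blocks[idx_start] = 0
--     n_blocks = [x + to_split // len(blocks) for x in n_blocks]
--     for i in range(idx_start + 1, idx_start + 1 + to_split % len(blocks)):
--         n_blocks[i % len(blocks)] += 1
--     return tuple(n_blocks)
-- ===== SOURCE B (Python) =====
-- def cycle_once(blocks):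
--     n = len(blocks)
--     m = max(blocks)
--     idx = blocks.index(m)
--     q, r = divmod(m, n)
--     # rotate so that position 0 is the slot right after the max; the max slot is last
--     rot = list(blocks[idx + 1:]) + list(blocks[:idx + 1])
--     rot[-1] = 0
--     # the first r slots in this frame get q+1 extra blocks, the rest get q
--     out_rot = [x + q + 1 for x in rot[:r]] + [x + q for x in rot[r:]]
--     # rotate back to the original frame
--     k = n - 1 - idx
--     return tuple(out_rot[k:] + out_rot[:k])
-- ===== Notes on version B (the rewrite author's own statement) =====
-- stated objective: alternative
-- what changed: Replaces A's in-place scheme (zero the max slot in a copy, broadcast-add the quotient, then a loop incrementing modulo-wrapped indices) by a rotate-split-rotate construction: rotate the list so the emptied max slot is last, give q+1 to the first r slots and q to the rest by slicing and concatenation, then rotate back; no index arithmetic modulo n and no mutation loop.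
import Mathlib
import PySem

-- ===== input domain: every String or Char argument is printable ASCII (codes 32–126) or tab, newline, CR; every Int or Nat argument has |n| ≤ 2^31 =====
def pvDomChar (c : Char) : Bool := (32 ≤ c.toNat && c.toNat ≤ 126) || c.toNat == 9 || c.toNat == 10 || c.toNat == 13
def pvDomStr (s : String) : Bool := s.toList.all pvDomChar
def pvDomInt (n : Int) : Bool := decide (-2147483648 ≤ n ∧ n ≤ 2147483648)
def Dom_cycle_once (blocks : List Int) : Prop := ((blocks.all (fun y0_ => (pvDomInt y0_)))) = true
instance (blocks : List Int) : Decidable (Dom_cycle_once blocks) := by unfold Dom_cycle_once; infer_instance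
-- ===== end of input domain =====

-- B replaces A's in-place scheme (zero the max slot in a copy, add the quotient everywhere,
-- then a loop incrementing modulo-wrapped indices) by a rotate-split-rotate construction
-- built from slices and concatenation; same O(n) cost, a different decomposition.

-- ===== PORT A =====
def cycle_once (blocks : List Int) : List Int :=
  match PySem.List.max? blocks (fun y => y) with
  | none => []          -- max(()) raises ValueError; excluded by Pre_
  | some m =>
    match PySem.List.index? blocks m with
    | none => []        -- unreachable: m ∈ blocks
    | some idx_start =>
      let n : Int := PySem.List.len blocks
      let to_split : Int := PySem.List.pyGetD blocks (idx_start : Int) 0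
      let n_blocks := PySem.List.pySetD blocks (idx_start : Int) 0
      let n_blocks := n_blocks.map (fun x => x + PySem.Int.floordiv to_split n)
      (PySem.List.pyRange ((idx_start : Int) + 1) ((idx_start : Int) + 1 + PySem.Int.mod to_split n) 1).foldl
        (fun nb i => PySem.List.pySetD nb (PySem.Int.mod i n)
          (PySem.List.pyGetD nb (PySem.Int.mod i n) 0 + 1)) n_blocks

-- ===== PORT B =====
def cycle_once_alt (blocks : List Int) : List Int :=
  match PySem.List.max? blocks (fun y => y) with
  | none => []          -- max(()) raises ValueError; excluded by Pre_
  | some m =>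
    match PySem.List.index? blocks m with
    | none => []        -- unreachable: m ∈ blocks
    | some idx =>
      let n : Int := PySem.List.len blocks
      let q : Int := PySem.Int.floordiv m n
      let r : Int := PySem.Int.mod m n
      -- rotate so that position 0 is the slot right after the max; the max slot is last
      let rot := PySem.List.slice blocks (some ((idx : Int) + 1)) none
              ++ PySem.List.slice blocks none (some ((idx : Int) + 1))
      let rot := PySem.List.pySetD rot (-1) 0
      -- the first r slots in this frame get q+1 extra blocks, the rest get q
      let out_rot := (PySem.List.slice rot none (some r)).map (fun x => x + q + 1)
                  ++ (PySem.List.slice rot (some r) none).map (fun x => x + q)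
      -- rotate back to the original frame
      let k : Int := n - 1 - (idx : Int)
      PySem.List.slice out_rot (some k) none ++ PySem.List.slice out_rot none (some k)

-- ===== PRECONDITION & SPEC =====
-- Pre_ excludes only the empty list, on which both A and B raise ValueError (max of empty).
def Pre_cycle_once (blocks : List Int) : Prop := blocks ≠ []
instance (blocks : List Int) : Decidable (Pre_cycle_once blocks) := by
  unfold Pre_cycle_once; infer_instance
def pvWitness_cycle_once : List Int := [0, 2, 7, 0]

def Spec_cycle_once (blocks : List Int) (out : List Int) : Prop := out = cycle_once_alt blocks
instance (blocks : List Int) (out : List Int) : Decidable (Spec_cycle_once blocks out) := by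
  unfold Spec_cycle_once; infer_instance

-- ===== CLAIM (what is proved, stated in full; the proofs are below) =====
def Claim_equal_cycle_once : Prop := ∀ (blocks : List Int), Dom_cycle_once blocks → Pre_cycle_once blocks → Spec_cycle_once blocks (cycle_once blocks)

-- ===== LEMMAS AND PROOFS =====

-- the fold of A's remainder loop preserves the length of the accumulator
theorem loop_length (n : Int) (is : List Int) (L : List Int) :
    (is.foldl (fun nb i => PySem.List.pySetD nb (PySem.Int.mod i n)
      (PySem.List.pyGetD nb (PySem.Int.mod i n) 0 + 1)) L).length = L.length := by
  induction is generalizing L with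
  | nil => rfl
  | cons x xs ih => simp [List.foldl_cons, ih, PySem.List.length_pySetD]

-- index arithmetic: j hits position (a+k) mod n iff (j-a) mod n = k
theorem mod_index_eq (n a j : Int) (k : Nat) (hn : 0 < n)
    (hj0 : 0 ≤ j) (hjn : j < n) (hk : (k : Int) < n) :
    j = PySem.Int.mod (a + (k : Int)) n ↔ PySem.Int.mod (j - a) n = (k : Int) := by
  rw [PySem.Int.mod_eq_emod_of_pos hn, PySem.Int.mod_eq_emod_of_pos hn]
  have h1 : j % n = j := Int.emod_eq_of_lt hj0 hjn
  have h2 : (k : Int) % n = (k : Int) := Int.emod_eq_of_lt (by positivity) hk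
  rw [show (j = (a + (k:Int)) % n) ↔ (j % n = (a + (k:Int)) % n) from by rw [h1],
      show ((j - a) % n = (k:Int)) ↔ ((j - a) % n = (k:Int) % n) from by rw [h2],
      Int.emod_eq_emod_iff_emod_sub_eq_zero,
      Int.emod_eq_emod_iff_emod_sub_eq_zero, show j - (a + (k:Int)) = j - a - (k:Int) from by ring]

-- value of slot j after A's remainder loop: base value plus 1 iff (j-a) mod n < k
theorem loop_getD (n : Int) (hn : 0 < n) (a : Int) (k : Nat) (hk : (k : Int) ≤ n)
    (L : List Int) (hL : (L.length : Int) = n) (j : Int) (hj0 : 0 ≤ j) (hjn : j < n) :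
    PySem.List.pyGetD ((PySem.List.pyRange a (a + (k : Int)) 1).foldl
      (fun nb i => PySem.List.pySetD nb (PySem.Int.mod i n)
        (PySem.List.pyGetD nb (PySem.Int.mod i n) 0 + 1)) L) j 0
    = PySem.List.pyGetD L j 0 + (if PySem.Int.mod (j - a) n < (k : Int) then 1 else 0) := by
  induction k with
  | zero =>
    have : PySem.List.pyRange a (a + ((0:Nat) : Int)) 1 = [] := by
      apply PySem.List.pyRange_one_eq_nil; omega
    have hge : 0 ≤ PySem.Int.mod (j - a) n := PySem.Int.mod_nonneg _ hn
    simp only [this, List.foldl_nil]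
    rw [if_neg (by push_cast; omega)]; ring
  | succ k ih =>
    have hk' : (k : Int) ≤ n := by push_cast at hk ⊢; omega
    have hkn : (k : Int) < n := by push_cast at hk; omega
    have hsplit : PySem.List.pyRange a (a + ((k+1 : Nat) : Int)) 1
        = PySem.List.pyRange a (a + (k : Int)) 1 ++ [a + (k : Int)] := by
      rw [show a + ((k+1 : Nat) : Int) = (a + (k : Int)) + 1 from by push_cast; ring]
      exact PySem.List.pyRange_one_succ_right (by omega)
    rw [hsplit, List.foldl_append]
    set M := (PySem.List.pyRange a (a + (k : Int)) 1).foldl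
      (fun nb i => PySem.List.pySetD nb (PySem.Int.mod i n)
        (PySem.List.pyGetD nb (PySem.Int.mod i n) 0 + 1)) L with hM
    have hMlen : (M.length : Int) = n := by rw [hM, loop_length]; exact hL
    have he0 : 0 ≤ PySem.Int.mod (a + (k : Int)) n := PySem.Int.mod_nonneg _ hn
    have hen : PySem.Int.mod (a + (k : Int)) n < n := PySem.Int.mod_lt _ hn
    simp only [List.foldl_cons, List.foldl_nil]
    rw [PySem.List.pySetD_of_nonneg _ _ he0,
        PySem.List.pyGetD_eq_getElem _ 0 hj0 (by rw [List.length_set]; omega),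
        List.getElem_set]
    have hiff := mod_index_eq n a j k hn hj0 hjn hkn
    by_cases hje : j = PySem.Int.mod (a + (k : Int)) n
    · have hfk : PySem.Int.mod (j - a) n = (k : Int) := hiff.mp hje
      rw [if_pos (by omega), ← hje, ih hk', hfk,
          if_neg (by omega), if_pos (by push_cast; omega)]
      ring
    · have hfk : PySem.Int.mod (j - a) n ≠ (k : Int) := fun h => hje (hiff.mpr h)
      rw [if_neg (by omega), ← PySem.List.pyGetD_eq_getElem M 0 hj0 (by omega), ih hk']
      congr 1
      have hc : (PySem.Int.mod (j - a) n < ((k+1 : Nat) : Int)) ↔ (PySem.Int.mod (j - a) n < (k : Int)) := by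
        push_cast; omega
      rw [if_congr hc rfl rfl]


theorem setD_neg_one (xs : List Int) (v : Int) (h : xs ≠ []) :
    PySem.List.pySetD xs (-1) v = xs.set (xs.length - 1) v := by
  have h1 : 1 ≤ xs.length := List.length_pos_iff.mpr h
  simp [PySem.List.pySetD, PySem.List.pySet?, PySem.List.pyIdx?, h1]

-- the value of slot p of B's bumped list: rot[p] + q, plus 1 on the first r slots
theorem out_rot_getElem (rot : List Int) (q r : Int) (hr0 : 0 ≤ r) (p : Nat)
    (hp : p < rot.length) :
    (((rot.take r.toNat).map (fun x => x + q + 1) ++ (rot.drop r.toNat).map (fun x => x + q)).length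
      = rot.length) ∧
    ((rot.take r.toNat).map (fun x => x + q + 1) ++ (rot.drop r.toNat).map (fun x => x + q))[p]'(by
        simp [List.length_append, List.length_take, List.length_drop]; omega)
      = rot[p] + q + (if (p : Int) < r then 1 else 0) := by
  constructor
  · simp [List.length_append, List.length_take, List.length_drop]; omega
  · rw [List.getElem_append]
    split
    · next h =>
      rw [List.getElem_map, List.getElem_take]
      rw [if_pos (by simp [List.length_take] at h; omega)]
    · next h =>
      simp only [List.length_map, List.length_take] at h
      rw [List.getElem_map, List.getElem_drop]
      rw [if_neg (by omega)]
      have hidx2 : r.toNat + (p - (List.map (fun x => x + q + 1) (List.take r.toNat rot)).length) = p := by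
        simp only [List.length_map, List.length_take]; omega
      simp only [hidx2]
      omega

-- B's rotate-split-rotate expression equals the pointwise closed form over range(n)
theorem B_rot_eq_map (blocks : List Int) (idx : Nat) (q r : Int)
    (hlt : idx < blocks.length) (hr0 : 0 ≤ r) :
    (PySem.List.slice
        (List.map (fun x => x + q + 1)
            (PySem.List.slice
              (PySem.List.pySetD
                (PySem.List.slice blocks (some ((idx:Int) + 1)) none ++ PySem.List.slice blocks none (some ((idx:Int) + 1))) (-1) 0)
              none (some r)) ++
          List.map (fun x => x + q)
            (PySem.List.slice
              (PySem.List.pySetD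
                (PySem.List.slice blocks (some ((idx:Int) + 1)) none ++ PySem.List.slice blocks none (some ((idx:Int) + 1))) (-1) 0)
              (some r) none))
        (some ((blocks.length:Int) - 1 - idx)) none ++
      PySem.List.slice
        (List.map (fun x => x + q + 1)
            (PySem.List.slice
              (PySem.List.pySetD
                (PySem.List.slice blocks (some ((idx:Int) + 1)) none ++ PySem.List.slice blocks none (some ((idx:Int) + 1))) (-1) 0)
              none (some r)) ++
          List.map (fun x => x + q)
            (PySem.List.slice
              (PySem.List.pySetD
                (PySem.List.slice blocks (some ((idx:Int) + 1)) none ++ PySem.List.slice blocks none (some ((idx:Int) + 1))) (-1) 0)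
              (some r) none))
        none (some ((blocks.length:Int) - 1 - idx)))
    = (PySem.List.pyRange 0 (blocks.length:Int) 1).map
        (fun j => (if j = (idx:Int) then 0 else PySem.List.pyGetD blocks j 0) + q
                  + (if PySem.Int.mod (j - idx - 1) (blocks.length:Int) < r then 1 else 0)) := by
  set n := blocks.length with hn
  have hn0 : 0 < n := by omega
  -- reduce the slices of blocks to drop/take
  have hc : ((idx : Int) + 1) = (((idx + 1 : Nat)) : Int) := by push_cast; ring
  rw [hc, PySem.List.slice_from_natCast, PySem.List.slice_to_natCast]
  set rot0 : List Int := blocks.drop (idx + 1) ++ blocks.take (idx + 1) with hrot0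
  have hrot0len : rot0.length = n := by
    simp [hrot0, List.length_append, List.length_drop, List.length_take]; omega
  have hrot0ne : rot0 ≠ [] := by
    intro hz; rw [hz] at hrot0len; simp at hrot0len; omega
  rw [setD_neg_one _ _ hrot0ne, hrot0len]
  set rot : List Int := rot0.set (n - 1) 0 with hrot
  have hrotlen : rot.length = n := by simp [hrot, hrot0len]
  rw [PySem.List.slice_to _ hr0, PySem.List.slice_from _ hr0]
  set out : List Int := (rot.take r.toNat).map (fun x => x + q + 1)
      ++ (rot.drop r.toNat).map (fun x => x + q) with hout
  have houtlen : out.length = n := by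
    simp [hout, List.length_append, List.length_take, List.length_drop]; omega
  have hk0 : (0:Int) ≤ (n:Int) - 1 - idx := by omega
  rw [PySem.List.slice_from _ hk0, PySem.List.slice_to _ hk0]
  have hkt : ((n:Int) - 1 - idx).toNat = n - 1 - idx := by omega
  rw [hkt, PySem.List.pyRange_zero_natCast]
  set kN := n - 1 - idx with hkN
  rw [List.map_map]
  apply List.ext_getElem
  · simp [houtlen, List.length_drop, List.length_take]; omega
  intro j hj1 hj2
  simp only [List.length_range, List.length_map] at hj2
  -- the right-hand side at j
  rw [List.getElem_map, List.getElem_range]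
  simp only [Function.comp_apply]
  -- the left-hand side at j
  have hdl : (out.drop kN).length = idx + 1 := by
    simp only [List.length_drop, houtlen]; omega
  have hmod : ∀ x : Int, -(n:Int) ≤ x → x < n → PySem.Int.mod x (n:Int)
      = if 0 ≤ x then x else x + n := by
    intro x h1 h2
    rw [PySem.Int.mod_eq_emod_of_pos (by exact_mod_cast hn0)]
    split
    · exact Int.emod_eq_of_lt (by omega) h2
    · have h3 := Int.add_mul_emod_self_left (a := x) (b := (n:Int)) (c := 1)
      rw [mul_one] at h3
      rw [← h3]
      exact Int.emod_eq_of_lt (by omega) (by omega)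
  rw [List.getElem_append]
  split
  · -- j ≤ idx: this slot comes from out[kN + j]
    next hcase =>
    rw [hdl] at hcase
    rw [List.getElem_drop]
    have hpn : kN + j < n := by omega
    rw [(out_rot_getElem rot q r hr0 (kN + j) (by omega)).2]
    have hmodv : PySem.Int.mod ((j:Int) - idx - 1) (n:Int) = ((kN + j : Nat) : Int) := by
      rw [hmod _ (by omega) (by omega)]
      rw [if_neg (by omega)]
      omega
    rw [hmodv]
    congr 1
    simp only [hrot, List.getElem_set]
    by_cases hji : j = idx
    · rw [if_pos (show n - 1 = kN + j by omega),
          if_pos (show ((j:Nat):Int) = ((idx:Nat):Int) by omega)]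
    · rw [if_neg (show ¬ (n - 1 = kN + j) by omega),
          if_neg (show ¬ ((j:Nat):Int) = ((idx:Nat):Int) by omega)]
      simp only [hrot0, List.getElem_append]
      have hdl2 : (blocks.drop (idx+1)).length = n - (idx+1) := by
        simp [List.length_drop, hn]
      rw [dif_neg (by rw [hdl2]; omega)]
      rw [List.getElem_take]
      have hix : kN + j - (blocks.drop (idx+1)).length = j := by rw [hdl2]; omega
      simp only [hix]
      rw [PySem.List.pyGetD_natCast, List.getD_eq_getElem?_getD,
          List.getElem?_eq_getElem (show j < blocks.length by omega), Option.getD_some]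
  · -- j > idx: this slot comes from out[j - (idx+1)]
    next hcase =>
    rw [hdl] at hcase
    rw [List.getElem_take]
    have hji : idx < j := by omega
    have hix0 : j - (out.drop kN).length = j - (idx + 1) := by rw [hdl]
    simp only [hix0]
    rw [(out_rot_getElem rot q r hr0 (j - (idx+1)) (by omega)).2]
    have hmodv : PySem.Int.mod ((j:Int) - idx - 1) (n:Int) = ((j - (idx+1) : Nat) : Int) := by
      rw [hmod _ (by omega) (by omega)]
      rw [if_pos (by omega)]
      omega
    rw [hmodv]
    congr 1
    simp only [hrot, List.getElem_set]
    rw [if_neg (show ¬ (n - 1 = j - (idx+1)) by omega),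
        if_neg (show ¬ ((j:Nat):Int) = ((idx:Nat):Int) by omega)]
    simp only [hrot0, List.getElem_append]
    have hdl2 : (blocks.drop (idx+1)).length = n - (idx+1) := by
      simp [List.length_drop, hn]
    rw [dif_pos (by rw [hdl2]; omega)]
    rw [List.getElem_drop]
    have hix : idx + 1 + (j - (idx + 1)) = j := by omega
    simp only [hix]
    rw [PySem.List.pyGetD_natCast, List.getD_eq_getElem?_getD,
        List.getElem?_eq_getElem (show j < blocks.length by omega), Option.getD_some]

-- ===== VERDICT (by name: the statement is the Claim_ definition above) =====
theorem cycle_once_spec : Claim_equal_cycle_once := by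
  intro blocks _ hpre
  unfold Spec_cycle_once
  obtain ⟨m, hm⟩ : ∃ m, PySem.List.max? blocks (fun y => y) = some m := by
    cases h : PySem.List.max? blocks (fun y => y) with
    | none => exact absurd ((PySem.List.max?_eq_none_iff _ _).mp h) hpre
    | some m => exact ⟨m, rfl⟩
  have hmem : m ∈ blocks := PySem.List.max?_mem hm
  obtain ⟨idx, hidx⟩ : ∃ idx, PySem.List.index? blocks m = some idx := by
    cases h : PySem.List.index? blocks m with
    | none => exact absurd ((PySem.List.index?_eq_none_iff _ _).mp h) (not_not_intro hmem)
    | some idx => exact ⟨idx, rfl⟩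
  obtain ⟨hlt, hgv, -⟩ := PySem.List.getElem_of_index?_eq_some hidx
  have hn : 0 < (blocks.length : Int) := by
    cases blocks with
    | nil => exact absurd rfl hpre
    | cons x xs => simp
  have hr0 : 0 ≤ PySem.Int.mod m (blocks.length : Int) := PySem.Int.mod_nonneg _ hn
  -- B's rotate-split-rotate expression is the pointwise closed form
  have hB : cycle_once_alt blocks
      = (PySem.List.pyRange 0 (blocks.length : Int) 1).map
          (fun j => (if j = (idx : Int) then 0 else PySem.List.pyGetD blocks j 0)
                    + PySem.Int.floordiv m (blocks.length : Int)
                    + (if PySem.Int.mod (j - idx - 1) (blocks.length : Int)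
                         < PySem.Int.mod m (blocks.length : Int) then 1 else 0)) := by
    simp only [cycle_once_alt, hm, hidx, PySem.List.len_eq]
    exact B_rot_eq_map blocks idx _ _ hlt hr0
  rw [hB]
  -- A's fold also computes that closed form, slot by slot
  have hts : PySem.List.pyGetD blocks ((idx : Nat) : Int) 0 = m := by
    rw [PySem.List.pyGetD_natCast, List.getD_eq_getElem?_getD, List.getElem?_eq_getElem hlt, hgv]
    rfl
  simp only [cycle_once, hm, hidx, PySem.List.len_eq, hts]
  set n : Int := (blocks.length : Int) with hndef
  set q : Int := PySem.Int.floordiv m n with hq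
  set base : List Int := (PySem.List.pySetD blocks ((idx : Nat) : Int) 0).map (fun x => x + q) with hbase
  have hbaselen : (base.length : Int) = n := by
    rw [hbase, List.length_map, PySem.List.length_pySetD]
  -- the remainder, as a Nat
  have hrn : PySem.Int.mod m n < n := PySem.Int.mod_lt _ hn
  set k : Nat := (PySem.Int.mod m n).toNat with hkdef
  have hkcast : ((k : Nat) : Int) = PySem.Int.mod m n := by omega
  have hkle : ((k : Nat) : Int) ≤ n := by omega
  -- the result of A's loop
  set R : List Int := (PySem.List.pyRange ((idx : Nat) + 1) ((idx : Nat) + 1 + PySem.Int.mod m n) 1).foldl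
      (fun nb i => PySem.List.pySetD nb (PySem.Int.mod i n)
        (PySem.List.pyGetD nb (PySem.Int.mod i n) 0 + 1)) base with hR
  have hRlen : (R.length : Int) = n := by rw [hR, loop_length]; exact hbaselen
  -- R is the map of its own entries over range(n)
  have hRmap : R = (PySem.List.pyRange 0 n 1).map (fun j => PySem.List.pyGetD R j 0) := by
    conv_lhs => rw [← PySem.List.map_pyGetD_pyRange_zero' R (0 : Int)]
    rw [hRlen]
  rw [hRmap]
  apply List.map_congr_left
  intro j hj
  rw [PySem.List.mem_pyRange_one] at hj
  obtain ⟨hj0, hjn⟩ := hj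
  -- entry j of A's loop result
  have hloop := loop_getD n hn ((idx : Nat) + 1) k hkle base hbaselen j hj0 hjn
  rw [hkcast] at hloop
  rw [hR, hloop]
  -- entry j of the base list
  have hjlen : j.toNat < blocks.length := by omega
  have hbj : PySem.List.pyGetD base j 0
      = (if j = ((idx : Nat) : Int) then 0 else PySem.List.pyGetD blocks j 0) + q := by
    rw [hbase, PySem.List.pyGetD_eq_getElem _ 0 hj0
          (by rw [List.length_map, PySem.List.length_pySetD]; omega),
        List.getElem_map]
    simp only [PySem.List.pySetD_natCast]
    rw [List.getElem_set, PySem.List.pyGetD_eq_getElem blocks 0 hj0 (by omega)]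
    have hc : (idx = j.toNat) ↔ (j = ((idx : Nat) : Int)) := by omega
    rw [if_congr hc rfl rfl]
  rw [hbj, show j - ((idx : Nat) + 1) = j - (idx : Nat) - 1 from by ring]
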